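-- pv_equiv track=rewrite | github.com/UTokyoChenYe/SlopeSearch | model/subsequence_method.py | count_kmers_start_ry_4_6
-- ===== SOURCE A (Python) =====
-- from collections import Counter
-- from typing import List
--
-- def count_kmers_start_ry_4_6(sequences: List[str], k: int) -> Counter:
--     """计算以特定 RY46 模式开头的 k-mer 频率"""
--     patterns = [
--         'RRRRRY', 'RRYRRY', 'RRYRYY', 'RYRRRR', 'RYRRRY',
--         'RYRYRY', 'RYYRRR', 'RYYRRY', 'RYYRYR', 'RYYRYY',
--         'RYYYRY', 'RYYYYY', 'YRYRRY', 'YYYRRR', 'YYYRRY',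
--         'YYYYRY'
--     ]
--     table = str.maketrans("ACGT", "RYRY")
--     word_length = len(next(iter(patterns)))
--
--     for sequence in sequences:
--         ry_sequence = sequence.translate(table)
--         for i in range(len(sequence) - k + 1):
--             ry_pattern = ry_sequence[i:i + word_length]
--             if ry_pattern in patterns:
--                 yield sequence[i:i + k]
-- ===== SOURCE B (Python) =====
-- _PATTERNS = [
--     'RRRRRY', 'RRYRRY', 'RRYRYY', 'RYRRRR', 'RYRRRY',
--     'RYRYRY', 'RYYRRR', 'RYYRRY', 'RYYRYR', 'RYYRYY',
--     'RYYYRY', 'RYYYYY', 'YRYRRY', 'YYYRRR', 'YYYRRY',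
--     'YYYYRY'
-- ]
--
--
-- def _expand(p):
--     """All raw 6-char windows whose RY-translation is p (R <- A/G/R, Y <- C/T/Y)."""
--     if not p:
--         return ['']
--     opts = 'AGR' if p[0] == 'R' else 'CTY'
--     rest = _expand(p[1:])
--     return [o + t for o in opts for t in rest]
--
--
-- _DNA6 = {t for p in _PATTERNS for t in _expand(p)}
--
--
-- def count_kmers_start_ry_4_6(sequences, k):
--     for s in sequences:
--         n = len(s)
--         for i in range(n - 5):
--             if s[i:i + 6] in _DNA6 and i <= n - k:
--                 yield s[i:i + k]
-- ===== Notes on version B (the rewrite author's own statement) =====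
-- stated objective: faster
-- what changed: Instead of RY-translating every sequence and testing each 6-char window against the 16 RY patterns, B expands the 16 patterns once into the set of all raw 6-char windows they match (R<-A/G/R, Y<-C/T/Y) and scans window positions directly, testing the raw substring against that precomputed hash set.
import Mathlib
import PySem

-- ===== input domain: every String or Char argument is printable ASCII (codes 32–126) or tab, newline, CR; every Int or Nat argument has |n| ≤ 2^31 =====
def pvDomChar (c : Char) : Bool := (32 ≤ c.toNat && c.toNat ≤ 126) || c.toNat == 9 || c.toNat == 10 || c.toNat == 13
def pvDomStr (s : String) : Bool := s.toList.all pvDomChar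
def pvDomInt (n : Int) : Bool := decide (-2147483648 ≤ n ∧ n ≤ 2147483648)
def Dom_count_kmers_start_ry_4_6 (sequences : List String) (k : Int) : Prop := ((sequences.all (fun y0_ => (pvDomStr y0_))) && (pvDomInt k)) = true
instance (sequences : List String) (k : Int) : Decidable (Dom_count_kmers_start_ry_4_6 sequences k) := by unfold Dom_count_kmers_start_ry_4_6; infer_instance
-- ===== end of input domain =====

-- B replaces A's per-sequence RY-translation + 16-pattern membership test by one precomputed
-- set of all raw 6-char windows the patterns match, scanned over window positions (the timing
-- run measured B faster by a constant factor); equivalence is proved for all inputs.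

-- ===== PORT A =====
-- str.maketrans("ACGT", "RYRY") applied to one character; other characters are unchanged
def pvTransChar (c : Char) : Char :=
  if c = 'A' then 'R' else if c = 'C' then 'Y'
  else if c = 'G' then 'R' else if c = 'T' then 'Y' else c

def pvPatterns : List String :=
  ["RRRRRY", "RRYRRY", "RRYRYY", "RYRRRR", "RYRRRY",
   "RYRYRY", "RYYRRR", "RYYRRY", "RYYRYR", "RYYRYY",
   "RYYYRY", "RYYYYY", "YRYRRY", "YYYRRR", "YYYRRY",
   "YYYYRY"]

def count_kmers_start_ry_4_6 (sequences : List String) (k : Int) : List String :=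
  -- word_length = len(next(iter(patterns)))
  let word_length : Int := PySem.Str.len (pvPatterns.headD "")
  sequences.foldl (fun out sequence =>
    -- ry_sequence = sequence.translate(table)
    let ry_sequence : String := String.ofList (sequence.toList.map pvTransChar)
    (PySem.List.pyRange 0 ((PySem.Str.len sequence) - k + 1) 1).foldl (fun out i =>
      let ry_pattern := PySem.Str.slice ry_sequence (some i) (some (i + word_length))
      if ry_pattern ∈ pvPatterns then
        out ++ [PySem.Str.slice sequence (some i) (some (i + k))]
      else out) out) []

-- ===== PORT B =====
-- _expand(p): all raw 6-char windows whose RY-translation is p (R <- A/G/R, Y <- C/T/Y)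
def pvExpand : List Char → List (List Char)
  | [] => [[]]
  | pc :: ps =>
    (if pc = 'R' then ['A', 'G', 'R'] else ['C', 'T', 'Y']).flatMap
      (fun o => (pvExpand ps).map (fun t => o :: t))

-- _DNA6 = {t for p in _PATTERNS for t in _expand(p)}
def pvDna6 : PySem.Set String :=
  PySem.Set.ofList (pvPatterns.flatMap (fun p => (pvExpand p.toList).map String.ofList))

def count_kmers_start_ry_4_6_alt (sequences : List String) (k : Int) : List String :=
  sequences.foldl (fun out s =>
    let n : Int := PySem.Str.len s
    (PySem.List.pyRange 0 (n - 5) 1).foldl (fun out i =>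
      if PySem.Str.slice s (some i) (some (i + 6)) ∈ pvDna6 ∧ i ≤ n - k then
        out ++ [PySem.Str.slice s (some i) (some (i + k))]
      else out) out) []

-- ===== PRECONDITION & SPEC =====
def Spec_count_kmers_start_ry_4_6 (sequences : List String) (k : Int) (out : List String) : Prop := out = count_kmers_start_ry_4_6_alt sequences k
instance (sequences : List String) (k : Int) (out : List String) : Decidable (Spec_count_kmers_start_ry_4_6 sequences k out) := by unfold Spec_count_kmers_start_ry_4_6; infer_instance

-- ===== CLAIM (what is proved, stated in full; the proofs are below) =====
def Claim_equal_count_kmers_start_ry_4_6 : Prop := ∀ (sequences : List String) (k : Int), Dom_count_kmers_start_ry_4_6 sequences k → Spec_count_kmers_start_ry_4_6 sequences k (count_kmers_start_ry_4_6 sequences k)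

-- ===== LEMMAS AND PROOFS =====
theorem transR (c : Char) : pvTransChar c = 'R' ↔ (c = 'A' ∨ c = 'G' ∨ c = 'R') := by
  unfold pvTransChar; split_ifs <;> simp_all

theorem transY (c : Char) : pvTransChar c = 'Y' ↔ (c = 'C' ∨ c = 'T' ∨ c = 'Y') := by
  unfold pvTransChar; split_ifs <;> simp_all

theorem mem_pvExpand (p : List Char) (hp : ∀ c ∈ p, c = 'R' ∨ c = 'Y') (t : List Char) :
    t ∈ pvExpand p ↔ t.map pvTransChar = p := by
  induction p generalizing t with
  | nil => simp [pvExpand, List.map_eq_nil_iff]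
  | cons pc ps ih =>
    have hpc : pc = 'R' ∨ pc = 'Y' := hp pc (by simp)
    have hps : ∀ c ∈ ps, c = 'R' ∨ c = 'Y' := fun c hc => hp c (by simp [hc])
    simp only [pvExpand, List.mem_flatMap, List.mem_map]
    constructor
    · rintro ⟨o, ho, t', ht', rfl⟩
      rcases hpc with h | h <;> simp [h] at ho <;>
        simp [List.map_cons, (ih hps t').1 ht'] <;>
        rcases ho with h' | h' | h' <;> simp [h', h, pvTransChar]
    · intro h
      rcases t with _ | ⟨c, t'⟩
      · simp at h
      · simp only [List.map_cons, List.cons.injEq] at h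
        refine ⟨c, ?_, t', (ih hps t').2 h.2, rfl⟩
        rcases hpc with hh | hh <;> rw [hh] at h ⊢
        · have := (transR c).1 h.1; simpa using this
        · have := (transY c).1 h.1; simpa using this

theorem patterns_ry : ∀ p ∈ pvPatterns, ∀ c ∈ p.toList, c = 'R' ∨ c = 'Y' := by
  intro p hp
  fin_cases hp <;> simp

theorem patterns_len : ∀ p ∈ pvPatterns, p.toList.length = 6 := by
  intro p hp
  fin_cases hp <;> simp

theorem mem_pvDna6 (s : String) :
    s ∈ pvDna6 ↔ String.ofList (s.toList.map pvTransChar) ∈ pvPatterns := by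
  rw [pvDna6, PySem.Set.mem_ofList, List.mem_flatMap]
  constructor
  · rintro ⟨p, hp, hs⟩
    simp only [List.mem_map] at hs
    obtain ⟨t, ht, rfl⟩ := hs
    have := (mem_pvExpand p.toList (patterns_ry p hp) t).1 ht
    simpa [this] using hp
  · intro h
    refine ⟨String.ofList (s.toList.map pvTransChar), h, ?_⟩
    simp only [List.mem_map]
    exact ⟨s.toList, (mem_pvExpand _ (patterns_ry _ h) _).2 (by simp), by simp⟩

theorem len_of_mem_pvDna6 {s : String} (h : s ∈ pvDna6) : s.toList.length = 6 := by
  rw [mem_pvDna6] at h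
  have := patterns_len _ h
  simpa using this

theorem slice_toList (s : String) (i : Int) (hi : 0 ≤ i) (m : Nat) :
    (PySem.Str.slice s (some i) (some (i + m))).toList = (s.toList.drop i.toNat).take m := by
  have h2 : (0:Int) ≤ i + m := by positivity
  rw [PySem.Str.toList_slice, PySem.Chars.slice_eq_listSlice, PySem.List.slice_toNat _ hi h2]
  congr 1
  omega

theorem ry_slice_eq (s : String) (i : Int) (hi : 0 ≤ i) :
    (PySem.Str.slice (String.ofList (s.toList.map pvTransChar)) (some i) (some (i + (6:Nat)))).toList
      = ((s.toList.drop i.toNat).take 6).map pvTransChar := by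
  rw [slice_toList _ _ hi]
  simp [List.map_take, List.map_drop]

theorem cond_iff (s : String) (i : Int) (hi : 0 ≤ i) :
    (PySem.Str.slice (String.ofList (s.toList.map pvTransChar)) (some i) (some (i + (6:Nat)))) ∈ pvPatterns
      ↔ (PySem.Str.slice s (some i) (some (i + (6:Nat)))) ∈ pvDna6 := by
  have hx : String.ofList (((s.toList.drop i.toNat).take 6).map pvTransChar)
      = PySem.Str.slice (String.ofList (s.toList.map pvTransChar)) (some i) (some (i + (6:Nat))) := by
    rw [← ry_slice_eq s i hi, String.ofList_toList]
  rw [mem_pvDna6, slice_toList _ _ hi, hx]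

theorem bound_of_mem (s : String) (i : Int) (hi : 0 ≤ i)
    (h : (PySem.Str.slice s (some i) (some (i + (6:Nat)))) ∈ pvDna6) :
    i + 6 ≤ (s.toList.length : Int) := by
  have hl := len_of_mem_pvDna6 h
  rw [slice_toList _ _ hi] at hl
  simp [List.length_take, List.length_drop] at hl
  have hls : s.toList.length = s.length := String.length_toList
  omega

theorem filter_pyRange_drop (Q : Int → Bool) (a b : Int) (hab : a ≤ b)
    (h : ∀ i : Int, 0 ≤ i → Q i = true → i < a) :
    (PySem.List.pyRange 0 b 1).filter Q = (PySem.List.pyRange 0 a 1).filter Q := by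
  by_cases h0 : 0 ≤ a
  · rw [PySem.List.pyRange_one_append 0 a b h0 hab, List.filter_append]
    have : (PySem.List.pyRange a b 1).filter Q = [] := by
      rw [List.filter_eq_nil_iff]
      intro i hi
      have hm := (PySem.List.mem_pyRange_one.1 hi).1
      intro hq
      exact absurd (h i (le_trans h0 hm) hq) (by omega)
    simp [this]
  · have h1 : PySem.List.pyRange 0 a 1 = [] := PySem.List.pyRange_one_eq_nil (by omega)
    have h2 : (PySem.List.pyRange 0 b 1).filter Q = [] := by
      rw [List.filter_eq_nil_iff]
      intro i hi hq
      have hm := (PySem.List.mem_pyRange_one.1 hi).1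
      exact absurd (h i hm hq) (by omega)
    simp [h1, h2]

theorem filter_pyRange_ext (Q : Int → Bool) (a b : Int)
    (h : ∀ i : Int, 0 ≤ i → Q i = true → i < a ∧ i < b) :
    (PySem.List.pyRange 0 a 1).filter Q = (PySem.List.pyRange 0 b 1).filter Q := by
  rcases le_total a b with hab | hab
  · exact (filter_pyRange_drop Q a b hab (fun i h0 hq => (h i h0 hq).1)).symm
  · exact filter_pyRange_drop Q b a hab (fun i h0 hq => (h i h0 hq).2)

theorem cond_iff' (s : String) (i : Int) (hi : 0 ≤ i) :
    (PySem.Str.slice (String.ofList (s.toList.map pvTransChar)) (some i) (some (i + 6))) ∈ pvPatterns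
      ↔ (PySem.Str.slice s (some i) (some (i + 6))) ∈ pvDna6 := by
  have := cond_iff s i hi
  norm_num at this
  exact this

theorem bound_of_mem' (s : String) (i : Int) (hi : 0 ≤ i)
    (h : (PySem.Str.slice s (some i) (some (i + 6))) ∈ pvDna6) :
    i + 6 ≤ PySem.Str.len s := by
  have hb := bound_of_mem s i hi (by norm_num; exact h)
  simp [PySem.Str.len_eq]
  have : s.toList.length = s.length := String.length_toList
  omega


theorem hstep_lem (s : String) (k : Int) :
    (PySem.List.pyRange 0 ((PySem.Str.len s) - k + 1) 1).filter
      (fun i => decide ((PySem.Str.slice (String.ofList (s.toList.map pvTransChar)) (some i) (some (i + 6))) ∈ pvPatterns))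
    = (PySem.List.pyRange 0 ((PySem.Str.len s) - k + 1) 1).filter
      (fun i => decide ((PySem.Str.slice s (some i) (some (i + 6))) ∈ pvDna6 ∧ i ≤ (PySem.Str.len s) - k)) := by
  apply List.filter_congr
  intro i hi
  have hm := PySem.List.mem_pyRange_one.1 hi
  apply decide_eq_decide.2
  rw [cond_iff' s i hm.1]
  constructor
  · exact fun h => ⟨h, by omega⟩
  · exact fun h => h.1

theorem hext_lem (s : String) (k : Int) :
    (PySem.List.pyRange 0 ((PySem.Str.len s) - k + 1) 1).filter
      (fun i => decide ((PySem.Str.slice s (some i) (some (i + 6))) ∈ pvDna6 ∧ i ≤ (PySem.Str.len s) - k))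
    = (PySem.List.pyRange 0 ((PySem.Str.len s) - 5) 1).filter
      (fun i => decide ((PySem.Str.slice s (some i) (some (i + 6))) ∈ pvDna6 ∧ i ≤ (PySem.Str.len s) - k)) := by
  apply filter_pyRange_ext
  intro i h0 hq
  rw [decide_eq_true_iff] at hq
  have hb := bound_of_mem' s i h0 hq.1
  exact ⟨by omega, by omega⟩

theorem per_seq (s : String) (k : Int) (out : List String) :
    (PySem.List.pyRange 0 ((PySem.Str.len s) - k + 1) 1).foldl (fun out i =>
      if (PySem.Str.slice (String.ofList (s.toList.map pvTransChar)) (some i) (some (i + 6))) ∈ pvPatterns then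
        out ++ [PySem.Str.slice s (some i) (some (i + k))] else out) out
    = (PySem.List.pyRange 0 ((PySem.Str.len s) - 5) 1).foldl (fun out i =>
      if (PySem.Str.slice s (some i) (some (i + 6))) ∈ pvDna6 ∧ i ≤ (PySem.Str.len s) - k then
        out ++ [PySem.Str.slice s (some i) (some (i + k))] else out) out := by
  rw [PySem.List.foldl_append_ite, PySem.List.foldl_append_ite, hstep_lem s k, hext_lem s k]


-- ===== VERDICT (by name: the statement is the Claim_ definition above) =====
theorem count_kmers_start_ry_4_6_spec : Claim_equal_count_kmers_start_ry_4_6 := by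
  intro sequences k _
  unfold Spec_count_kmers_start_ry_4_6 count_kmers_start_ry_4_6 count_kmers_start_ry_4_6_alt
  have hw : PySem.Str.len (pvPatterns.headD "") = 6 := by simp [pvPatterns]
  dsimp only
  rw [hw]
  apply PySem.List.foldl_congr_mem
  intro acc s hs
  exact per_seq s k acc
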